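-- pv_equiv track=rewrite | github.com/edoardob90/blitzstein-intro-to-probability-solutions | generate_content.py | typst_to_html
-- ===== SOURCE A (Python) =====
-- def typst_to_html(typst_content):
--     """Convert basic Typst markup to HTML."""
--     # This is a simple conversion. For production, you might want to:
--     # 1. Compile each problem to a separate PDF
--     # 2. Convert PDF to HTML/SVG
--     # 3. Or use a Typst-to-HTML library if available
--
--     html = typst_content
--
--     # Convert lists
--     lines = html.split('\n')
--     new_lines = []
--     in_list = False
--
--     for line in lines:
--         stripped = line.strip()
--         if stripped.startswith('+ '):
--             if not in_list:
--                 new_lines.append('<ol>')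
--                 in_list = True
--             item_content = stripped[2:]
--             new_lines.append(f'<li>{item_content}</li>')
--         elif stripped.startswith('- '):
--             if not in_list:
--                 new_lines.append('<ul>')
--                 in_list = True
--             item_content = stripped[2:]
--             new_lines.append(f'<li>{item_content}</li>')
--         else:
--             if in_list:
--                 new_lines.append('</ol>')  # or </ul>, we'll use ol for now
--                 in_list = False
--             if stripped:
--                 new_lines.append(f'<p>{line}</p>')
--             else:
--                 new_lines.append('')
--
--     if in_list:
--         new_lines.append('</ol>')
--
--     html = '\n'.join(new_lines)
--
--     # Keep math delimiters as-is for MathJax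
--     # Math in $ $ will be processed by MathJax on the client side
--
--     return html
-- ===== SOURCE B (Python) =====
-- def typst_to_html(typst_content):
--     """Convert basic Typst markup to HTML (run-based rewrite: consume list runs with an inner scan instead of an in_list flag)."""
--     lines = typst_content.split('\n')
--     out = []
--     i = 0
--     n = len(lines)
--     while i < n:
--         s = lines[i].strip()
--         if s.startswith('+ ') or s.startswith('- '):
--             out.append('<ol>' if s.startswith('+ ') else '<ul>')
--             while i < n:
--                 s = lines[i].strip()
--                 if not (s.startswith('+ ') or s.startswith('- ')):
--                     break
--                 out.append('<li>' + s[2:] + '</li>')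
--                 i += 1
--             out.append('</ol>')
--         else:
--             out.append('<p>' + lines[i] + '</p>' if s else '')
--             i += 1
--     return '\n'.join(out)
-- ===== Notes on version B (the rewrite author's own statement) =====
-- stated objective: alternative
-- what changed: Replaced A's single pass with an in_list boolean flag by a run-based two-level scan: an outer loop over the lines and an inner loop that consumes each whole run of consecutive list-item lines (emitting the open tag from the run's first marker, its <li> items, and the closing </ol>), so no flag state survives across iterations.
import Mathlib
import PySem

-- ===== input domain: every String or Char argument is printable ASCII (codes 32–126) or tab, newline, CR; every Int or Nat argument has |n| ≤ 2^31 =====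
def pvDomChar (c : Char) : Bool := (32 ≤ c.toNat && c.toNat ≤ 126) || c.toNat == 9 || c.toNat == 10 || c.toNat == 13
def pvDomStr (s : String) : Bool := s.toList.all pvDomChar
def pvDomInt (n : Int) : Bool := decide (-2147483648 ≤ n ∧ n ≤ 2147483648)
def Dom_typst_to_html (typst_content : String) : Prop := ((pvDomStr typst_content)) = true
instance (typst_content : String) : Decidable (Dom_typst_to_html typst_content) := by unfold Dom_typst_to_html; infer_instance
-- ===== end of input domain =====

-- B replaces A's in_list flag by a run-based scan (inner loop consuming a whole list run); objective: simpler decomposition, same cost.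

-- ===== PORT A =====
-- loop body of A's 'for line in lines', state = (new_lines, in_list)
def pvStepA (st : List String × Bool) (line : String) : List String × Bool :=
  let stripped := PySem.Str.strip line
  if PySem.Str.startswith stripped "+ " then
    let nl := if !st.2 then st.1 ++ ["<ol>"] else st.1
    (nl ++ ["<li>" ++ PySem.Str.slice stripped (some 2) none ++ "</li>"], true)
  else if PySem.Str.startswith stripped "- " then
    let nl := if !st.2 then st.1 ++ ["<ul>"] else st.1
    (nl ++ ["<li>" ++ PySem.Str.slice stripped (some 2) none ++ "</li>"], true)
  else
    let nl := if st.2 then st.1 ++ ["</ol>"] else st.1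
    (if stripped ≠ "" then nl ++ ["<p>" ++ line ++ "</p>"] else nl ++ [""], false)

def typst_to_html (typst_content : String) : String :=
  let lines := (PySem.Str.split? typst_content "\n").getD []   -- sep "\n" ≠ "": never none
  let st := lines.foldl pvStepA ([], false)
  let new_lines := if st.2 then st.1 ++ ["</ol>"] else st.1
  PySem.Str.join "\n" new_lines

-- ===== PORT B =====
-- B's inner while loop: consume the run of consecutive list-item lines, return (emitted <li> lines, remaining lines)
def pvTakeRun : List String → List String × List String
  | [] => ([], [])
  | l :: rest =>
    let s := PySem.Str.strip l
    if PySem.Str.startswith s "+ " || PySem.Str.startswith s "- " then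
      let r := pvTakeRun rest
      (("<li>" ++ PySem.Str.slice s (some 2) none ++ "</li>") :: r.1, r.2)
    else ([], l :: rest)

theorem pvTakeRun_len_le : ∀ ls : List String, (pvTakeRun ls).2.length ≤ ls.length := by
  intro ls
  induction ls with
  | nil => simp [pvTakeRun]
  | cons l rest ih =>
    simp only [pvTakeRun]
    split
    · simpa using Nat.le_succ_of_le ih
    · simp

-- B's outer while loop
def pvAltGo : List String → List String
  | [] => []
  | l :: rest =>
    let s := PySem.Str.strip l
    if _h : PySem.Str.startswith s "+ " || PySem.Str.startswith s "- " then
      let tag := if PySem.Str.startswith s "+ " then "<ol>" else "<ul>"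
      let r := pvTakeRun (l :: rest)
      tag :: r.1 ++ ["</ol>"] ++ pvAltGo r.2
    else (if PySem.Str.strip l ≠ "" then "<p>" ++ l ++ "</p>" else "") :: pvAltGo rest
termination_by ls => ls.length
decreasing_by
  · simp only [pvTakeRun]
    split
    · simpa using Nat.lt_succ_of_le (pvTakeRun_len_le rest)
    · exact absurd _h ‹_›
  · simp

def typst_to_html_alt (typst_content : String) : String :=
  let lines := (PySem.Str.split? typst_content "\n").getD []
  PySem.Str.join "\n" (pvAltGo lines)

-- ===== PRECONDITION & SPEC =====
def Spec_typst_to_html (typst_content : String) (out : String) : Prop := out = typst_to_html_alt typst_content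
instance (typst_content : String) (out : String) : Decidable (Spec_typst_to_html typst_content out) := by unfold Spec_typst_to_html; infer_instance

-- ===== CLAIM (what is proved, stated in full; the proofs are below) =====
def Claim_equal_typst_to_html : Prop := ∀ (typst_content : String), Dom_typst_to_html typst_content → Spec_typst_to_html typst_content (typst_to_html typst_content)

-- ===== LEMMAS AND PROOFS =====
def pvIsItem (l : String) : Bool :=
  PySem.Str.startswith (PySem.Str.strip l) "+ " || PySem.Str.startswith (PySem.Str.strip l) "- "

-- A's loop from in_list = true, closed off, equals B's run continuation;
-- A's loop from in_list = false, closed off, equals B's outer loop.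
theorem pv_main : ∀ (ls : List String) (nl : List String),
    ((if (ls.foldl pvStepA (nl, true)).2 then (ls.foldl pvStepA (nl, true)).1 ++ ["</ol>"]
        else (ls.foldl pvStepA (nl, true)).1)
      = nl ++ (pvTakeRun ls).1 ++ ["</ol>"] ++ pvAltGo (pvTakeRun ls).2)
  ∧ ((if (ls.foldl pvStepA (nl, false)).2 then (ls.foldl pvStepA (nl, false)).1 ++ ["</ol>"]
        else (ls.foldl pvStepA (nl, false)).1)
      = nl ++ pvAltGo ls) := by
  intro ls
  induction ls with
  | nil => intro nl; constructor <;> simp [pvTakeRun, pvAltGo]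
  | cons l rest ih =>
    intro nl
    by_cases hp : PySem.Str.startswith (PySem.Str.strip l) "+ " = true
    all_goals have hpC := hp
    all_goals simp at hpC
    · constructor
      · simp only [List.foldl_cons, pvStepA, hp, if_pos, Bool.not_true, Bool.false_eq_true,
          if_false]
        rw [(ih _).1]
        simp [pvTakeRun, hpC]
      · simp only [List.foldl_cons, pvStepA, hp, if_pos, Bool.not_false]
        rw [(ih _).1]
        simp [pvAltGo, pvTakeRun, hpC]
    · by_cases hm : PySem.Str.startswith (PySem.Str.strip l) "- " = true
      all_goals have hmC := hm
      all_goals simp at hmC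
      · constructor
        · simp only [List.foldl_cons, pvStepA, hp, Bool.false_eq_true, if_false, hm, if_pos,
            Bool.not_true]
          rw [(ih _).1]
          simp [pvTakeRun, hpC, hmC]
        · simp only [List.foldl_cons, pvStepA, hp, Bool.false_eq_true, if_false, hm, if_pos,
            Bool.not_false]
          rw [(ih _).1]
          simp [pvAltGo, pvTakeRun, hpC, hmC]
      · constructor
        · simp only [List.foldl_cons, pvStepA, hp, hm, Bool.false_eq_true, if_false, if_pos]
          rw [(ih _).2]
          simp [pvTakeRun, pvAltGo, hpC, hmC]
          split <;> simp
        · simp only [List.foldl_cons, pvStepA, hp, hm, Bool.false_eq_true, if_false]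
          rw [(ih _).2]
          simp [pvAltGo, hpC, hmC]
          split <;> simp

-- ===== VERDICT (by name: the statement is the Claim_ definition above) =====
theorem typst_to_html_spec : Claim_equal_typst_to_html := by
  intro tc _
  unfold Spec_typst_to_html typst_to_html typst_to_html_alt
  have h := (pv_main ((PySem.Str.split? tc "\n").getD []) []).2
  simp only [List.nil_append] at h
  simp [h]
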